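-- pv_equiv track=rewrite | github.com/amelialane123/LightSpeed-Extension | lightspeed_export.py | _relations_for_field_ids
-- ===== SOURCE A (Python) =====
-- def _relations_for_field_ids(field_ids: list[str]) -> list[str]:
--     """Return which Item relations we need to load for the selected fields."""
--     rels: list[str] = []
--     if "image" in field_ids:
--         rels.append("Images")
--     if "averageCost" in field_ids:
--         rels.append("ItemShops")
--     if "note" in field_ids:
--         rels.append("Note")
--     if any(x in field_ids for x in ("weight", "length", "width", "height")):
--         rels.append("ItemECommerce")
--     return rels
-- ===== SOURCE B (Python) =====
-- _FIELD_TO_REL = {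
--     "image": "Images",
--     "averageCost": "ItemShops",
--     "note": "Note",
--     "weight": "ItemECommerce",
--     "length": "ItemECommerce",
--     "width": "ItemECommerce",
--     "height": "ItemECommerce",
-- }
--
-- _REL_ORDER = ["Images", "ItemShops", "Note", "ItemECommerce"]
--
--
-- def _relations_for_field_ids(field_ids: list[str]) -> list[str]:
--     """Return which Item relations we need to load for the selected fields."""
--     seen = set()
--     for f in field_ids:
--         rel = _FIELD_TO_REL.get(f)
--         if rel is not None:
--             seen.add(rel)
--     return [r for r in _REL_ORDER if r in seen]
-- ===== Notes on version B (the rewrite author's own statement) =====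
-- stated objective: alternative
-- what changed: Instead of scanning field_ids once per relation with membership tests, B makes a single pass over field_ids, mapping each field through a field->relation dict into a set of needed relations, then emits the canonical relation order filtered by that set.
import Mathlib
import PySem

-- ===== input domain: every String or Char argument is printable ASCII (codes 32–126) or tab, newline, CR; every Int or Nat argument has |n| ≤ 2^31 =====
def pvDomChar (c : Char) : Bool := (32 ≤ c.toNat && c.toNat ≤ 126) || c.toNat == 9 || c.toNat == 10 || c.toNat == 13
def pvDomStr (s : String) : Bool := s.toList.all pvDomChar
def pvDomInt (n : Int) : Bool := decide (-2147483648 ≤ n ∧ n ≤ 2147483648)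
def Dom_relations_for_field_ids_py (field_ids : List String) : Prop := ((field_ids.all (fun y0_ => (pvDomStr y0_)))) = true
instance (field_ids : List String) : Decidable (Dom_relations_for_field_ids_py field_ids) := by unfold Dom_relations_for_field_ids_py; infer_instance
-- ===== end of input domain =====

-- B replaces A's four membership scans with one pass over field_ids through a field→relation dict into a set, then filters a canonical order list (alternative decomposition, same cost class).


-- ===== PORT A =====
def relations_for_field_ids_py (field_ids : List String) : List String :=
  let rels : List String := []
  let rels := if field_ids.contains "image" then rels ++ ["Images"] else rels
  let rels := if field_ids.contains "averageCost" then rels ++ ["ItemShops"] else rels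
  let rels := if field_ids.contains "note" then rels ++ ["Note"] else rels
  let rels := if (["weight", "length", "width", "height"] : List String).any
      (fun x => field_ids.contains x) then rels ++ ["ItemECommerce"] else rels
  rels

-- ===== PORT B =====
def pvFieldToRel : PySem.Dict String String := PySem.Dict.mk
  [("image", "Images"), ("averageCost", "ItemShops"), ("note", "Note"),
   ("weight", "ItemECommerce"), ("length", "ItemECommerce"),
   ("width", "ItemECommerce"), ("height", "ItemECommerce")]

def pvRelOrder : List String := ["Images", "ItemShops", "Note", "ItemECommerce"]

def relations_for_field_ids_py_alt (field_ids : List String) : List String :=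
  let seen : PySem.Set String := field_ids.foldl (fun s f =>
    match pvFieldToRel.get? f with
    | some rel => PySem.Set.add s rel
    | none => s) PySem.Set.empty
  pvRelOrder.filter (fun r => PySem.Set.contains seen r)

-- ===== PRECONDITION & SPEC =====
def Spec_relations_for_field_ids_py (field_ids : List String) (out : List String) : Prop := out = relations_for_field_ids_py_alt field_ids
instance (field_ids : List String) (out : List String) : Decidable (Spec_relations_for_field_ids_py field_ids out) := by unfold Spec_relations_for_field_ids_py; infer_instance

-- ===== CLAIM (what is proved, stated in full; the proofs are below) =====
def Claim_equal_relations_for_field_ids_py : Prop := ∀ (field_ids : List String), Dom_relations_for_field_ids_py field_ids → Spec_relations_for_field_ids_py field_ids (relations_for_field_ids_py field_ids)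

-- ===== LEMMAS AND PROOFS =====

-- dict-lookup characterisation: which fields map to which relation
theorem pvGet (f : String) : pvFieldToRel.get? f =
    if f = "image" then some "Images"
    else if f = "averageCost" then some "ItemShops"
    else if f = "note" then some "Note"
    else if f = "weight" ∨ f = "length" ∨ f = "width" ∨ f = "height" then some "ItemECommerce"
    else none := by
  simp only [pvFieldToRel, PySem.Dict.get?_mk_cons]
  split_ifs <;> simp_all [PySem.Dict.get?] <;> simp_all [eq_comm]

-- membership in the accumulated set of B's single pass, for a fixed target relation r:
-- r is in the final set iff it was already in s or some field maps to r.
theorem pvSeen_contains (field_ids : List String) (s : PySem.Set String) (r : String) :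
    PySem.Set.contains
      (field_ids.foldl (fun s f =>
        match pvFieldToRel.get? f with
        | some rel => PySem.Set.add s rel
        | none => s) s) r
    = (PySem.Set.contains s r || field_ids.any (fun f => pvFieldToRel.get? f == some r)) := by
  induction field_ids generalizing s with
  | nil => simp
  | cons f fs ih =>
    simp only [List.foldl_cons, List.any_cons, ih]
    cases h : pvFieldToRel.get? f with
    | none => simp [h]
    | some rel =>
      simp only [h]
      by_cases hr : rel = r
      · subst hr; simp [PySem.Set.mem_add]
      · have hb : (rel == r) = false := beq_eq_false_iff_ne.mpr hr
        simp [PySem.Set.mem_add, hb, Ne.symm hr]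

theorem pvMaps_Images (fs : List String) :
    fs.any (fun f => pvFieldToRel.get? f == some "Images") = fs.contains "image" := by
  induction fs with
  | nil => rfl
  | cons f fs ih =>
    simp only [List.any_cons, List.contains_cons]
    rw [ih, pvGet]
    split_ifs <;> simp_all <;> tauto

theorem pvMaps_ItemShops (fs : List String) :
    fs.any (fun f => pvFieldToRel.get? f == some "ItemShops") = fs.contains "averageCost" := by
  induction fs with
  | nil => rfl
  | cons f fs ih =>
    simp only [List.any_cons, List.contains_cons]
    rw [ih, pvGet]
    split_ifs <;> simp_all <;> tauto

theorem pvMaps_Note (fs : List String) :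
    fs.any (fun f => pvFieldToRel.get? f == some "Note") = fs.contains "note" := by
  induction fs with
  | nil => rfl
  | cons f fs ih =>
    simp only [List.any_cons, List.contains_cons]
    rw [ih, pvGet]
    split_ifs <;> simp_all <;> tauto

theorem pvMaps_ECom (fs : List String) :
    fs.any (fun f => pvFieldToRel.get? f == some "ItemECommerce")
      = (fs.contains "weight" || fs.contains "length" || fs.contains "width" || fs.contains "height") := by
  induction fs with
  | nil => rfl
  | cons f fs ih =>
    simp only [List.any_cons, List.contains_cons]
    rw [ih, pvGet]
    split_ifs with h1 h2 h3 h4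
    · simp_all
    · simp_all
    · simp_all
    · rcases h4 with rfl | rfl | rfl | rfl <;> simp
    · have w1 : ¬f = "weight" := fun h => h4 (Or.inl h)
      have w2 : ¬f = "length" := fun h => h4 (Or.inr (Or.inl h))
      have w3 : ¬f = "width" := fun h => h4 (Or.inr (Or.inr (Or.inl h)))
      have w4 : ¬f = "height" := fun h => h4 (Or.inr (Or.inr (Or.inr h)))
      simp [beq_eq_false_iff_ne.mpr (Ne.symm w1), beq_eq_false_iff_ne.mpr (Ne.symm w2),
        beq_eq_false_iff_ne.mpr (Ne.symm w3), beq_eq_false_iff_ne.mpr (Ne.symm w4)]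

-- ===== VERDICT (by name: the statement is the Claim_ definition above) =====
theorem relations_for_field_ids_py_spec : Claim_equal_relations_for_field_ids_py := by
  intro field_ids _
  unfold Spec_relations_for_field_ids_py relations_for_field_ids_py relations_for_field_ids_py_alt
  simp only [pvRelOrder, List.filter_cons, List.filter_nil, pvSeen_contains, pvMaps_Images,
    pvMaps_ItemShops, pvMaps_Note, pvMaps_ECom, PySem.Set.empty]
  simp only [List.any_cons, List.any_nil, Bool.or_false]
  split_ifs <;> simp_all
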